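-- pv_equiv track=rewrite | github.com/pedronery07/Academia-Python | 6. lista/dif3/kits_para_corredores.py | organiza_filas
-- ===== SOURCE A (Python) =====
-- def organiza_filas(l):
--     fila = [[],[],[],[]]
--     for i in range(len(l)):
--         idade = l[i][1]
--         nome = l[i][0]
--         if idade <= 20:
--             fila[0].append(nome)
--         elif idade > 20 and idade <= 40:
--             fila[1].append(nome)
--         elif idade > 40 and idade <= 60:
--             fila[2].append(nome)
--         else:
--             fila[3].append(nome)
--     return fila
-- ===== SOURCE B (Python) =====
-- def organiza_filas(l):
--     return [
--         [nome for nome, idade in l if idade <= 20],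
--         [nome for nome, idade in l if 20 < idade <= 40],
--         [nome for nome, idade in l if 40 < idade <= 60],
--         [nome for nome, idade in l if idade > 60],
--     ]
-- ===== Notes on version B (the rewrite author's own statement) =====
-- stated objective: simpler
-- what changed: Replaces the single-pass dispatch loop maintaining four mutable queues with four independent filtering comprehensions, one per age range; each bucket is built by its own pass, so no mutable state or branching dispatch is needed.
import Mathlib
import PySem

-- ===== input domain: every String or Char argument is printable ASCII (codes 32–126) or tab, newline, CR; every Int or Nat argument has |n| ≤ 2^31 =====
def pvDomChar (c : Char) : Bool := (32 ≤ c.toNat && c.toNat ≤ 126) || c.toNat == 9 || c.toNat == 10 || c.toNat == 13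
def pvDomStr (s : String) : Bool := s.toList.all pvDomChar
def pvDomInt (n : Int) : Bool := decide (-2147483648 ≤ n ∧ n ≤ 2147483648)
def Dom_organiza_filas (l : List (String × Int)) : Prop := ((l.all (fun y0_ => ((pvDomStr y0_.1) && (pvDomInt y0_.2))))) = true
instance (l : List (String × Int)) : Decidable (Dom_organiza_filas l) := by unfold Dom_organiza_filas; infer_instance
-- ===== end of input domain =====

-- B builds each of the four buckets by its own filtering pass instead of A's one-pass dispatch over four mutable queues (simpler; same asymptotic cost).

-- ===== PORT A =====
-- A keeps four queues and dispatches each element with an if/elif chain in one pass.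
def organiza_filas (l : List (String × Int)) : List (List String) :=
  let fila :=
    l.foldl (fun (f : List String × List String × List String × List String) p =>
      let idade := p.2
      let nome := p.1
      if idade ≤ 20 then (f.1 ++ [nome], f.2.1, f.2.2.1, f.2.2.2)
      else if idade > 20 ∧ idade ≤ 40 then (f.1, f.2.1 ++ [nome], f.2.2.1, f.2.2.2)
      else if idade > 40 ∧ idade ≤ 60 then (f.1, f.2.1, f.2.2.1 ++ [nome], f.2.2.2)
      else (f.1, f.2.1, f.2.2.1, f.2.2.2 ++ [nome]))
      ([], [], [], [])
  [fila.1, fila.2.1, fila.2.2.1, fila.2.2.2]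

-- ===== PORT B =====
-- each comprehension '[nome for nome, idade in l if cond]' is a filterMap over l
def organiza_filas_alt (l : List (String × Int)) : List (List String) :=
  [ l.filterMap (fun p => if p.2 ≤ 20 then some p.1 else none),
    l.filterMap (fun p => if 20 < p.2 ∧ p.2 ≤ 40 then some p.1 else none),
    l.filterMap (fun p => if 40 < p.2 ∧ p.2 ≤ 60 then some p.1 else none),
    l.filterMap (fun p => if 60 < p.2 then some p.1 else none) ]

-- ===== PRECONDITION & SPEC =====
def Spec_organiza_filas (l : List (String × Int)) (out : List (List String)) : Prop := out = organiza_filas_alt l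
instance (l : List (String × Int)) (out : List (List String)) : Decidable (Spec_organiza_filas l out) := by unfold Spec_organiza_filas; infer_instance

-- ===== CLAIM =====
def Claim_equal_organiza_filas : Prop := ∀ (l : List (String × Int)), Dom_organiza_filas l → Spec_organiza_filas l (organiza_filas l)

-- ===== LEMMAS AND PROOFS =====
theorem organiza_filas_fold_filters (l : List (String × Int)) :
    ∀ (a b c d : List String),
      l.foldl (fun (f : List String × List String × List String × List String) p =>
        let idade := p.2
        let nome := p.1
        if idade ≤ 20 then (f.1 ++ [nome], f.2.1, f.2.2.1, f.2.2.2)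
        else if idade > 20 ∧ idade ≤ 40 then (f.1, f.2.1 ++ [nome], f.2.2.1, f.2.2.2)
        else if idade > 40 ∧ idade ≤ 60 then (f.1, f.2.1, f.2.2.1 ++ [nome], f.2.2.2)
        else (f.1, f.2.1, f.2.2.1, f.2.2.2 ++ [nome])) (a, b, c, d) =
      (a ++ l.filterMap (fun p => if p.2 ≤ 20 then some p.1 else none),
       b ++ l.filterMap (fun p => if 20 < p.2 ∧ p.2 ≤ 40 then some p.1 else none),
       c ++ l.filterMap (fun p => if 40 < p.2 ∧ p.2 ≤ 60 then some p.1 else none),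
       d ++ l.filterMap (fun p => if 60 < p.2 then some p.1 else none)) := by
  induction l with
  | nil => intro a b c d; simp
  | cons p t ih =>
    intro a b c d
    obtain ⟨nome, idade⟩ := p
    simp only [List.foldl_cons, List.filterMap_cons]
    by_cases h1 : idade ≤ 20
    · simpa [h1, show ¬(20 < idade ∧ idade ≤ 40) by omega,
        show ¬(40 < idade ∧ idade ≤ 60) by omega, show ¬(60 < idade) by omega]
        using ih (a ++ [nome]) b c d
    · by_cases h2 : idade ≤ 40
      · simpa [h1, show (20 < idade ∧ idade ≤ 40) by omega, show idade > 20 by omega,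
          show ¬(40 < idade ∧ idade ≤ 60) by omega, show ¬(60 < idade) by omega]
          using ih a (b ++ [nome]) c d
      · by_cases h3 : idade ≤ 60
        · simpa [h1, h2, show (40 < idade ∧ idade ≤ 60) by omega, show idade > 40 by omega,
            show ¬(20 < idade ∧ idade ≤ 40) by omega, show ¬(60 < idade) by omega]
            using ih a b (c ++ [nome]) d
        · simpa [h1, h2, h3, show (60 < idade) by omega,
            show ¬(20 < idade ∧ idade ≤ 40) by omega, show ¬(40 < idade ∧ idade ≤ 60) by omega]
            using ih a b c (d ++ [nome])

-- ===== VERDICT =====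
theorem organiza_filas_spec : Claim_equal_organiza_filas := by
  intro l _
  unfold Spec_organiza_filas organiza_filas organiza_filas_alt
  simp [organiza_filas_fold_filters l [] [] [] []]
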